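-- pv_equiv track=rewrite | github.com/jonsims/grantbot | archive/src/processors/narrative_enhancer.py | _extract_implications
-- ===== SOURCE A (Python) =====
-- from typing import Dict, List, Any, Tuple
--
-- def _extract_implications(sentences: List[str]) -> str:
--     """Extract implications or applications from sentences"""
--     implications = ['applications', 'implications', 'impact', 'effects', 'consequences']
--     for sentence in sentences:
--         if any(word in sentence.lower() for word in implications):
--             # Extract the implication part
--             words = sentence.split()
--             for i, word in enumerate(words):
--                 if word.lower() in implications and i < len(words) - 3:
--                     return ' '.join(words[i+1:i+8]).lower()
--     return "future research directions"
-- ===== SOURCE B (Python) =====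
-- def _extract_implications(sentences):
--     keywords = ('applications', 'implications', 'impact', 'effects', 'consequences')
--     for sentence in sentences:
--         words = sentence.split()
--         prefix = [w.lower() for w in words[:len(words) - 3]] if len(words) > 3 else []
--         hits = [prefix.index(k) for k in keywords if k in prefix]
--         if hits:
--             i = min(hits)
--             return ' '.join(words[i + 1:i + 8]).lower()
--     return "future research directions"
-- ===== Notes on version B (the rewrite author's own statement) =====
-- stated objective: alternative
-- what changed: B inverts the search: instead of A's any()-substring pre-scan followed by a word-by-word scan for the first keyword, B builds the lowered word prefix words[:len-3] once, computes each keyword's first index in it with list.index, and returns the snippet at the minimum of those hit positions (keyword-major search with a min, instead of word-major scan with early exit).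
import Mathlib
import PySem

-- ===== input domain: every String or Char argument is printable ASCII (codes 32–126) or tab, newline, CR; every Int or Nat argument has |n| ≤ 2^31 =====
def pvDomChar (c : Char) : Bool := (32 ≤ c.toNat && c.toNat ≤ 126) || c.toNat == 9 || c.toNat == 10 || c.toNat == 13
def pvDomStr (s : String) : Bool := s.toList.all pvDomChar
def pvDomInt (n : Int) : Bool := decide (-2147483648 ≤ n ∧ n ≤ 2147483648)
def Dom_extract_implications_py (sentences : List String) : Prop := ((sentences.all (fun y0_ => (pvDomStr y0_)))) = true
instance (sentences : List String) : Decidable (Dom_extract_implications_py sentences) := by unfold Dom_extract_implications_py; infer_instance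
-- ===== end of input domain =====

-- B inverts the search: instead of A's word-by-word scan (guarded by a redundant any() substring
-- pre-scan), it collects each keyword's first position in the lowered word prefix and takes the
-- minimum; objective: alternative, same result.

-- ===== PORT A =====
def pvKws : List String := ["applications", "implications", "impact", "effects", "consequences"]

-- inner loop: for i, word in enumerate(words): …
def pvInnerA (words : List String) : Nat → List String → Option String
  | _, [] => none
  | i, w :: rest =>
    if pvKws.contains (PySem.Str.lower w) && decide ((i : Int) < (words.length : Int) - 3) then
      some (PySem.Str.lower (PySem.Str.join " " (PySem.List.slice words (some ((i : Int) + 1)) (some ((i : Int) + 8)))))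
    else pvInnerA words (i + 1) rest

def extract_implications_py : List String → String
  | [] => "future research directions"
  | s :: rest =>
    if pvKws.any (fun kw => PySem.Str.isIn kw (PySem.Str.lower s)) then
      let words := PySem.Str.split₀ s
      match pvInnerA words 0 words with
      | some r => r
      | none => extract_implications_py rest
    else extract_implications_py rest

-- ===== PORT B =====
def pvKwB : List String := ["applications", "implications", "impact", "effects", "consequences"]

-- prefix = [w.lower() for w in words[:len(words) - 3]] if len(words) > 3 else []
def pvPreB (words : List String) : List String :=
  if 3 < words.length then
    (PySem.List.slice words none (some ((words.length : Int) - 3))).map PySem.Str.lower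
  else []

-- hits = [prefix.index(k) for k in keywords if k in prefix]
def pvHitsB (pre : List String) : List Nat :=
  pvKwB.filterMap (fun k => if pre.contains k then PySem.List.index? pre k else none)

-- per sentence: if hits: i = min(hits); return ' '.join(words[i+1:i+8]).lower()
def pvSnippetB (sentence : String) : Option String :=
  match PySem.List.min? (pvHitsB (pvPreB (PySem.Str.split₀ sentence))) (fun x => x) with
  | some i => some (PySem.Str.lower (PySem.Str.join " " (PySem.List.slice (PySem.Str.split₀ sentence) (some ((i : Int) + 1)) (some ((i : Int) + 8)))))
  | none => none

def extract_implications_py_alt (sentences : List String) : String :=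
  (sentences.findSome? pvSnippetB).getD "future research directions"

-- ===== PRECONDITION & SPEC =====
def Spec_extract_implications_py (sentences : List String) (out : String) : Prop := out = extract_implications_py_alt sentences
instance (sentences : List String) (out : String) : Decidable (Spec_extract_implications_py sentences out) := by unfold Spec_extract_implications_py; infer_instance

-- ===== CLAIM (what is proved, stated in full; the proofs are below) =====
def Claim_equal_extract_implications_py : Prop := ∀ (sentences : List String), Dom_extract_implications_py sentences → Spec_extract_implications_py sentences (extract_implications_py sentences)

-- ===== LEMMAS AND PROOFS =====

theorem pv_kws_eq : pvKwB = pvKws := by decide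

-- the snippet both programs build at word index i
def pvMkSnip (words : List String) (i : Nat) : String :=
  PySem.Str.lower (PySem.Str.join " " (PySem.List.slice words (some ((i : Int) + 1)) (some ((i : Int) + 8))))

-- every piece produced by Python's whitespace split is an infix of the original character list
theorem pv_mem_split₀_go_infix :
    ∀ (s cur : List Char) (acc : List (List Char)) (w : List Char),
      w ∈ PySem.Chars.split₀.go s cur acc → w ∈ acc ∨ w <:+: (cur.reverse ++ s) := by
  intro s
  induction s with
  | nil =>
    intro cur acc w h
    unfold PySem.Chars.split₀.go at h
    by_cases hc : cur.isEmpty = true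
    · simp [hc] at h
      exact Or.inl h
    · simp [hc] at h
      rcases h with h | h
      · exact Or.inl h
      · subst h
        exact Or.inr ⟨[], [], by simp⟩
  | cons c rest ih =>
    intro cur acc w h
    unfold PySem.Chars.split₀.go at h
    by_cases hs : PySem.Chars.isspace c = true
    · simp only [hs, if_true] at h
      by_cases hc : cur.isEmpty = true
      · simp only [hc, if_true] at h
        rcases ih [] acc w h with h' | h'
        · exact Or.inl h'
        · simp only [List.reverse_nil, List.nil_append] at h'
          exact Or.inr (h'.trans ⟨cur.reverse ++ [c], [], by simp⟩)
      · simp only [hc] at h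
        rcases ih [] (cur.reverse :: acc) w h with h' | h'
        · rcases List.mem_cons.mp h' with h'' | h''
          · exact Or.inr (h'' ▸ ⟨[], c :: rest, by simp⟩)
          · exact Or.inl h''
        · simp only [List.reverse_nil, List.nil_append] at h'
          exact Or.inr (h'.trans ⟨cur.reverse ++ [c], [], by simp⟩)
    · simp only [hs] at h
      rcases ih (c :: cur) acc w h with h' | h'
      · exact Or.inl h'
      · exact Or.inr (by simpa [List.append_assoc] using h')

theorem pv_mem_split₀_infix (cs : List Char) (w : List Char)
    (h : w ∈ PySem.Chars.split₀ cs) : w <:+: cs := by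
  have := pv_mem_split₀_go_infix cs [] [] w h
  simpa using this

-- A's inner enumerate-loop is the first qualifying index in the word prefix
theorem pv_inner_eq_findIdx : ∀ (words : List String) (rest : List String) (i : Nat),
    rest = words.drop i →
    pvInnerA words i rest =
      (List.findIdx? (fun w => pvKws.contains (PySem.Str.lower w))
        (rest.take (words.length - 3 - i))).map (fun j => pvMkSnip words (i + j)) := by
  intro words rest
  induction rest with
  | nil => intro i h; simp [pvInnerA]
  | cons w rest' ih =>
    intro i h
    have hi : i < words.length := by
      by_contra hcon
      rw [List.drop_eq_nil_of_le (by omega)] at h; cases h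
    have hrest : rest' = words.drop (i + 1) := by
      have := congrArg List.tail h
      simpa [List.tail_drop] using this
    by_cases hlim : i < words.length - 3
    · have hn : words.length - 3 - i = (words.length - 3 - (i + 1)) + 1 := by omega
      have hlim' : (i : Int) < (words.length : Int) - 3 := by omega
      rw [hn, List.take_succ_cons, List.findIdx?_cons]
      by_cases hkw : pvKws.contains (PySem.Str.lower w) = true
      · have hcond : (pvKws.contains (PySem.Str.lower w)
            && decide ((i : Int) < (words.length : Int) - 3)) = true := by
          rw [hkw, decide_eq_true hlim']; rfl
        have hA : pvInnerA words i (w :: rest')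
            = some (PySem.Str.lower (PySem.Str.join " "
                (PySem.List.slice words (some ((i : Int) + 1)) (some ((i : Int) + 8))))) := by
          simp only [pvInnerA]; rw [hcond]; rfl
        rw [hA, if_pos hkw, Option.map_some]
        simp [pvMkSnip]
      · have hcond : (pvKws.contains (PySem.Str.lower w)
            && decide ((i : Int) < (words.length : Int) - 3)) = false := by
          rw [Bool.and_eq_false_iff]; left; simpa using hkw
        have hA : pvInnerA words i (w :: rest') = pvInnerA words (i + 1) rest' := by
          simp only [pvInnerA]; rw [hcond]; rfl
        have hfun : (fun j => pvMkSnip words (i + 1 + j))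
            = (fun j => pvMkSnip words (i + j)) ∘ (fun j => j + 1) := by
          funext j
          simp only [Function.comp_apply]
          rw [show i + 1 + j = i + (j + 1) from by omega]
        rw [hA, ih (i + 1) hrest, if_neg hkw, Option.map_map, hfun]
    · have hn : words.length - 3 - i = 0 := by omega
      have hn' : words.length - 3 - (i + 1) = 0 := by omega
      have hlim' : ¬ ((i : Int) < (words.length : Int) - 3) := by omega
      have hcond : (pvKws.contains (PySem.Str.lower w)
          && decide ((i : Int) < (words.length : Int) - 3)) = false := by
        rw [Bool.and_eq_false_iff]; right; simpa using hlim'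
      have hA : pvInnerA words i (w :: rest') = pvInnerA words (i + 1) rest' := by
        simp only [pvInnerA]; rw [hcond]; rfl
      have hih := ih (i + 1) hrest
      rw [hn'] at hih
      rw [hn, hA, hih]
      simp only [List.take_zero, List.findIdx?_nil, Option.map_none]

-- min over keyword first-occurrence indices = first index whose word is a keyword
theorem pv_min_hits_eq_findIdx (kws pre : List String) :
    PySem.List.min? (kws.filterMap (fun k => if pre.contains k then PySem.List.index? pre k else none)) (fun x => x)
      = List.findIdx? (fun w => kws.contains w) pre := by
  have hhits : (kws.filterMap (fun k => if pre.contains k then PySem.List.index? pre k else none))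
      = kws.filterMap (fun k => PySem.List.index? pre k) := by
    apply List.filterMap_congr
    intro k _
    by_cases hc : pre.contains k = true
    · rw [if_pos hc]
    · rw [if_neg hc]
      have hidx : PySem.List.index? pre k = none := by
        rw [PySem.List.index?_eq_none_iff]
        simpa using hc
      exact hidx.symm
  rw [hhits]
  have hmemhit : ∀ n, n ∈ kws.filterMap (fun k => PySem.List.index? pre k) →
      ∃ hn : n < pre.length, kws.contains pre[n] = true := by
    intro n hn
    obtain ⟨k, hk, hidx⟩ := List.mem_filterMap.mp hn
    obtain ⟨hlt, hget, -⟩ := PySem.List.getElem_of_index?_eq_some hidx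
    exact ⟨hlt, by simp [hget, hk]⟩
  cases hf : List.findIdx? (fun w => kws.contains w) pre with
  | none =>
    have hnone := List.findIdx?_eq_none_iff.mp hf
    have : kws.filterMap (fun k => PySem.List.index? pre k) = [] := by
      rw [List.filterMap_eq_nil_iff]
      intro k hk
      rw [PySem.List.index?_eq_none_iff]
      intro hkpre
      have := hnone k hkpre
      simp [hk] at this
    rw [this]
    exact (PySem.List.min?_eq_none_iff _ _).mpr rfl
  | some i =>
    obtain ⟨hilt, hpi, hmin⟩ := List.findIdx?_eq_some_iff_getElem.mp hf
    -- i itself is a hit: the keyword at position i first occurs at i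
    have hihit : i ∈ kws.filterMap (fun k => PySem.List.index? pre k) := by
      apply List.mem_filterMap.mpr
      refine ⟨pre[i], by simpa using hpi, ?_⟩
      have hsome : (PySem.List.index? pre pre[i]).isSome = true := by
        rw [PySem.List.index?_isSome_iff]
        exact List.getElem_mem hilt
      obtain ⟨j, hj⟩ := Option.isSome_iff_exists.mp hsome
      obtain ⟨hjlt, hjget, hjfirst⟩ := PySem.List.getElem_of_index?_eq_some hj
      have hji : j = i := by
        rcases Nat.lt_trichotomy j i with h | h | h
        · have hj' : ¬ (kws.contains pre[j] = true) := by simpa using hmin j h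
          rw [hjget] at hj'
          exact absurd (by simpa using hpi) hj'
        · exact h
        · exact absurd rfl (hjfirst i h)
      rw [hj, hji]
    cases hm : PySem.List.min? (kws.filterMap (fun k => PySem.List.index? pre k)) (fun x => x) with
    | none =>
      have := (PySem.List.min?_eq_none_iff _ _).mp hm
      rw [this] at hihit
      cases hihit
    | some m =>
      have hmmem := PySem.List.min?_mem hm
      have hmle : m ≤ i := PySem.List.min?_isMin hm i hihit
      obtain ⟨hmlt, hpm⟩ := hmemhit m hmmem
      have him : ¬ m < i := by
        intro hlt
        exact absurd hpm (by simpa using hmin m hlt)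
      have : m = i := by omega
      rw [this]

-- B's lowered prefix is the word prefix words[:len-3], each word lowered
theorem pv_preB_eq (words : List String) :
    pvPreB words = (words.take (words.length - 3)).map PySem.Str.lower := by
  unfold pvPreB
  by_cases h3 : 3 < words.length
  · rw [if_pos h3, show ((words.length : Int) - 3) = ((words.length - 3 : Nat) : Int) by omega,
      PySem.List.slice_to_natCast]
  · rw [if_neg h3]
    have : words.length - 3 = 0 := by omega
    simp [this]

-- B's per-sentence computation equals A's inner loop
theorem pv_snippetB_eq_inner (s : String) :
    pvSnippetB s = pvInnerA (PySem.Str.split₀ s) 0 (PySem.Str.split₀ s) := by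
  unfold pvSnippetB pvHitsB
  rw [pv_preB_eq, pv_min_hits_eq_findIdx, List.findIdx?_map,
    pv_inner_eq_findIdx (PySem.Str.split₀ s) (PySem.Str.split₀ s) 0 (by simp)]
  have hp : ((fun w => pvKwB.contains w) ∘ PySem.Str.lower)
      = (fun w => pvKws.contains (PySem.Str.lower w)) := by
    funext w; simp [pv_kws_eq, Function.comp]
  rw [hp, Nat.sub_zero]
  cases List.findIdx? (fun w => pvKws.contains (PySem.Str.lower w))
      ((PySem.Str.split₀ s).take ((PySem.Str.split₀ s).length - 3)) with
  | none => rfl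
  | some j => simp [pvMkSnip]

-- if A's inner loop fires on a sentence, A's any()-substring guard is true on it
theorem pv_guard_of_inner_some (s r : String)
    (h : pvInnerA (PySem.Str.split₀ s) 0 (PySem.Str.split₀ s) = some r) :
    pvKws.any (fun kw => PySem.Str.isIn kw (PySem.Str.lower s)) = true := by
  rw [pv_inner_eq_findIdx (PySem.Str.split₀ s) (PySem.Str.split₀ s) 0 (by simp)] at h
  cases hf : List.findIdx? (fun w => pvKws.contains (PySem.Str.lower w))
      ((PySem.Str.split₀ s).take ((PySem.Str.split₀ s).length - 3 - 0)) with
  | none => rw [hf] at h; cases h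
  | some i =>
    obtain ⟨hilt, hpi, -⟩ := List.findIdx?_eq_some_iff_getElem.mp hf
    set w := ((PySem.Str.split₀ s).take ((PySem.Str.split₀ s).length - 3 - 0))[i] with hw
    have hwmem : w ∈ PySem.Str.split₀ s := List.mem_of_mem_take (List.getElem_mem hilt)
    have hinf : w.toList <:+: s.toList := by
      apply pv_mem_split₀_infix
      rw [← PySem.Str.split₀_map_toList]
      exact List.mem_map_of_mem hwmem
    have hisin : PySem.Str.isIn (PySem.Str.lower w) (PySem.Str.lower s) = true := by
      rw [PySem.Str.isIn_eq, PySem.Str.toList_lower, PySem.Str.toList_lower,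
        PySem.Chars.isIn_iff_infix]
      exact List.IsInfix.map PySem.Chars.lowerChar hinf
    have hkmem : PySem.Str.lower w ∈ pvKws := by simpa using hpi
    exact List.any_eq_true.mpr ⟨_, hkmem, hisin⟩

theorem pv_main : ∀ (sentences : List String),
    extract_implications_py sentences = extract_implications_py_alt sentences := by
  intro sentences
  induction sentences with
  | nil => rfl
  | cons s rest ih =>
    rw [show extract_implications_py (s :: rest) =
        (if pvKws.any (fun kw => PySem.Str.isIn kw (PySem.Str.lower s)) then
          match pvInnerA (PySem.Str.split₀ s) 0 (PySem.Str.split₀ s) with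
          | some r => r
          | none => extract_implications_py rest
        else extract_implications_py rest) from rfl]
    by_cases hg : pvKws.any (fun kw => PySem.Str.isIn kw (PySem.Str.lower s)) = true
    · rw [if_pos hg]
      cases hsn : pvInnerA (PySem.Str.split₀ s) 0 (PySem.Str.split₀ s) with
      | some r =>
        unfold extract_implications_py_alt
        rw [List.findSome?_cons, pv_snippetB_eq_inner, hsn]
        rfl
      | none =>
        rw [ih]
        unfold extract_implications_py_alt
        rw [List.findSome?_cons, pv_snippetB_eq_inner, hsn]
    · have hsn : pvInnerA (PySem.Str.split₀ s) 0 (PySem.Str.split₀ s) = none := by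
        cases hsn : pvInnerA (PySem.Str.split₀ s) 0 (PySem.Str.split₀ s) with
        | none => rfl
        | some r => exact absurd (pv_guard_of_inner_some s r hsn) hg
      rw [if_neg (by simpa using hg), ih]
      unfold extract_implications_py_alt
      rw [List.findSome?_cons, pv_snippetB_eq_inner, hsn]

-- ===== VERDICT (by name: the statement is the Claim_ definition above) =====
theorem extract_implications_py_spec : Claim_equal_extract_implications_py := by
  intro sentences _
  unfold Spec_extract_implications_py
  exact pv_main sentences
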